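-- pv_equiv track=rewrite | github.com/DiLysenk/PythonProjects | task.py | partial_sum
-- ===== SOURCE A (Python) =====
-- def partial_sum(ints):
--     par_sum = []
--     for integer in ints:
--         n = 0
--         for i in range(integer + 1):
--             n = i + n
--         par_sum.append(n)
--     return par_sum
-- ===== SOURCE B (Python) =====
-- def partial_sum(ints):
--     return [max(n, 0) * (max(n, 0) + 1) // 2 for n in ints]
-- ===== Notes on version B (the rewrite author's own statement) =====
-- stated objective: faster
-- what changed: Replaced the per-element summation loop over range(n+1) with the closed-form triangular number max(n,0)*(max(n,0)+1)//2 computed in a single comprehension.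
import Mathlib
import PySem

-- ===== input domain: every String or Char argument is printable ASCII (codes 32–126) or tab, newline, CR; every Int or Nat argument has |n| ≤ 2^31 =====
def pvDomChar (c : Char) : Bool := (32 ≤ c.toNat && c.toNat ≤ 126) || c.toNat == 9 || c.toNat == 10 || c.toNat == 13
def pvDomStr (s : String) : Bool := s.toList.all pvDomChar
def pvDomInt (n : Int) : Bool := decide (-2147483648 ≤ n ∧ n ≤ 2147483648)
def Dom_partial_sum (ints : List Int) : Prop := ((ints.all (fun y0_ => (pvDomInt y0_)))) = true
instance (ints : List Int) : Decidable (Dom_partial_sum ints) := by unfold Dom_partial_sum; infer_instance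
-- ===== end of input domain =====

-- B replaces A's per-element summation loop with the closed-form triangular number
-- max(n,0)*(max(n,0)+1)//2 (objective: faster).

-- ===== PORT A =====
def partial_sum (ints : List Int) : List Int :=
  ints.foldl (fun par_sum integer =>
    par_sum ++ [(PySem.List.pyRange 0 (integer + 1) 1).foldl (fun n i => i + n) 0]) []

-- ===== PORT B =====
-- closed-form triangular number per element
def partial_sum_alt (ints : List Int) : List Int :=
  ints.map (fun n => PySem.Int.floordiv (max n 0 * (max n 0 + 1)) 2)

-- ===== PRECONDITION & SPEC =====
def Spec_partial_sum (ints : List Int) (out : List Int) : Prop := out = partial_sum_alt ints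
instance (ints : List Int) (out : List Int) : Decidable (Spec_partial_sum ints out) := by unfold Spec_partial_sum; infer_instance

-- ===== CLAIM (what is proved, stated in full; the proofs are below) =====
def Claim_equal_partial_sum : Prop := ∀ (ints : List Int), Dom_partial_sum ints → Spec_partial_sum ints (partial_sum ints)

-- ===== LEMMAS AND PROOFS =====

-- ===== VERDICT (by name: the statement is the Claim_ definition above) =====
lemma foldl_append_map (f : Int → Int) (xs : List Int) (acc : List Int) :
    xs.foldl (fun a x => a ++ [f x]) acc = acc ++ xs.map f := by
  induction xs generalizing acc with
  | nil => simp
  | cons y ys ih => simp [List.foldl_cons, ih]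

-- the inner loop of A sums the elements of range(b+1) onto s
lemma foldl_range_sum (N : Nat) (s : Int) :
    ((List.range N).map (fun k : Nat => (0 : Int) + (k : Int))).foldl (fun n i => i + n) s
      = s + ∑ k ∈ Finset.range N, (k : Int) := by
  induction N generalizing s with
  | zero => simp
  | succ m ih =>
      rw [List.range_succ, List.map_append, List.foldl_append, ih, Finset.sum_range_succ]
      simp
      ring

lemma gauss_sum (N : Nat) :
    (∑ k ∈ Finset.range N, (k : Int)) * 2 = (N : Int) * ((N : Int) - 1) := by
  induction N with
  | zero => simp
  | succ m ih => rw [Finset.sum_range_succ, add_mul, ih]; push_cast; ring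

lemma tri_eq (b : Int) :
    (PySem.List.pyRange 0 (b + 1) 1).foldl (fun n i => i + n) 0
      = PySem.Int.floordiv (max b 0 * (max b 0 + 1)) 2 := by
  rw [PySem.List.pyRange_one, foldl_range_sum]
  have hg := gauss_sum (b + 1 - 0).toNat
  have hg2 : (∑ k ∈ Finset.range (b + 1 - 0).toNat, (k : Int)) * 2
      = max b 0 * (max b 0 + 1) := by
    by_cases hb : 0 ≤ b
    · have hN : (((b + 1 - 0).toNat : Int)) = b + 1 := by omega
      rw [hN] at hg
      rw [max_eq_left hb, hg]; ring
    · have hN : (((b + 1 - 0).toNat : Int)) = 0 := by omega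
      rw [hN] at hg
      rw [max_eq_right (by omega : b ≤ 0)]
      simpa using hg
  have hfd : PySem.Int.floordiv (max b 0 * (max b 0 + 1)) 2
      = (max b 0 * (max b 0 + 1)) / 2 := by
    unfold PySem.Int.floordiv
    rw [Int.fdiv_eq_ediv]
    norm_num
  rw [hfd]
  omega

theorem partial_sum_spec : Claim_equal_partial_sum := by
  intro ints _
  unfold Spec_partial_sum partial_sum partial_sum_alt
  rw [foldl_append_map]
  simp [tri_eq]
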